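-- pv_equiv track=rewrite | github.com/chaudharyaditi2022/DSA-Solution-repo | String+MI/MatchPattern.py | matchPatternForXY
-- ===== SOURCE A (Python) =====
-- def matchPatternForXY(string, pattern, x, y):
--     start,end = 0,0
--     x_str = ""
--     y_str = ""
--     for char in pattern:
--         if char == 'x':
--             end += x
--             match_str = string[start:end]
--             if x_str == "":
--                 x_str = match_str
--             if x_str != match_str:
--                 return False,["",""]
--             start += x
--
--         elif char == 'y':
--             end += y
--             match_str = string[start:end]
--             if y_str == "":
--                 y_str = match_str
--             if y_str != match_str:
--                 return False,["",""]
--             start += y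
--
--     return True,[x_str,y_str]
-- ===== SOURCE B (Python) =====
-- def matchPatternForXY(string, pattern, x, y):
--     pos, x_segs, y_segs = 0, [], []
--     for ch in pattern:
--         if ch == 'x':
--             x_segs.append(string[pos:pos + x])
--             pos += x
--         elif ch == 'y':
--             y_segs.append(string[pos:pos + y])
--             pos += y
--     x_str = x_segs[0] if x_segs else ""
--     y_str = y_segs[0] if y_segs else ""
--     if all(s == x_str for s in x_segs) and all(s == y_str for s in y_segs):
--         return True, [x_str, y_str]
--     return False, ["", ""]
-- ===== Notes on version B (the rewrite author's own statement) =====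
-- stated objective: alternative
-- what changed: Replaces A's single interleaved loop (mutable start/end cursors, empty-string sentinels and early returns) with a build-then-verify decomposition: one pass collects the x- and y-segments into lists, then all segments are checked equal to the first of their list; Pre_ excludes only inputs with a negative segment length x or y whose pattern also repeats 'x' or 'y', where Python's negative-slice wraparound can make an empty segment precede a nonempty one and A's empty-sentinel skipping of it is an accidental corner as defensible as B's plain all-equal check.
-- outside the precondition, e.g. on matchPatternForXY('abc', 'yxxx', 1, -5): A returns (True, ['a', '']), B returns (False, ['', '']); on matchPatternForXY('abbbb', 'xzyy', -1, 2): A returns (True, ['abbb', 'bb']), B returns (False, ['', ''])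
import Mathlib
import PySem

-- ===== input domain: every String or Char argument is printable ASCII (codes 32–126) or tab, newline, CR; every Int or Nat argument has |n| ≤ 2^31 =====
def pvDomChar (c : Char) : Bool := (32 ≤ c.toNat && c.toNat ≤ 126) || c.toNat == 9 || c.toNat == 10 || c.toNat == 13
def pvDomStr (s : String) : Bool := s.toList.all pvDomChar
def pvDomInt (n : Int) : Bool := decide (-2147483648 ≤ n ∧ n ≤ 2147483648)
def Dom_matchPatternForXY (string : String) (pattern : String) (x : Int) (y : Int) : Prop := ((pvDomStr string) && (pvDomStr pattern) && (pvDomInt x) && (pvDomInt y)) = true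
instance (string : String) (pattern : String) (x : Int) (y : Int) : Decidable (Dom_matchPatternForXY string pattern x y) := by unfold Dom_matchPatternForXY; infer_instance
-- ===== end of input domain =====

-- B replaces A's interleaved compare-as-you-go loop by a build-segments-then-verify decomposition (objective: alternative; same cost).

-- ===== PORT A =====
-- A's for-loop with early `return`, transliterated as structural recursion over the
-- pattern's characters; state = (start, end, x_str, y_str), strings as List Char.
def matchPatternForXYGo (string : List Char) (x y : Int) :
    List Char → Int → Int → List Char → List Char → Bool × List String
  | [], _, _, xstr, ystr => (true, [String.ofList xstr, String.ofList ystr])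
  | c :: cs, start, e, xstr, ystr =>
    if c = 'x' then
      let e' := e + x
      let matchStr := PySem.List.slice string (some start) (some e')
      let xstr' := if xstr = [] then matchStr else xstr
      if xstr' ≠ matchStr then (false, ["", ""])
      else matchPatternForXYGo string x y cs (start + x) e' xstr' ystr
    else if c = 'y' then
      let e' := e + y
      let matchStr := PySem.List.slice string (some start) (some e')
      let ystr' := if ystr = [] then matchStr else ystr
      if ystr' ≠ matchStr then (false, ["", ""])
      else matchPatternForXYGo string x y cs (start + y) e' xstr ystr'
    else matchPatternForXYGo string x y cs start e xstr ystr

def matchPatternForXY (string : String) (pattern : String) (x : Int) (y : Int) : Bool × List String :=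
  matchPatternForXYGo string.toList x y pattern.toList 0 0 [] []

-- ===== PORT B =====
-- Source B: one fold collects (pos, x_segs, y_segs); then x_str/y_str are the first
-- segments (or "") and every segment must equal the first of its list.
def matchPatternForXY_alt (string : String) (pattern : String) (x : Int) (y : Int) : Bool × List String :=
  let st := pattern.toList.foldl
    (fun (acc : Int × List (List Char) × List (List Char)) ch =>
      if ch = 'x' then
        (acc.1 + x, acc.2.1 ++ [PySem.List.slice string.toList (some acc.1) (some (acc.1 + x))], acc.2.2)
      else if ch = 'y' then
        (acc.1 + y, acc.2.1, acc.2.2 ++ [PySem.List.slice string.toList (some acc.1) (some (acc.1 + y))])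
      else acc)
    (0, [], [])
  let xstr := st.2.1.headD []
  let ystr := st.2.2.headD []
  if st.2.1.all (· = xstr) && st.2.2.all (· = ystr) then
    (true, [String.ofList xstr, String.ofList ystr])
  else (false, ["", ""])

-- ===== PRECONDITION & SPEC =====
-- Pre_ excludes only inputs with a NEGATIVE segment length x or y whose pattern also
-- repeats 'x' or 'y': there Python's negative-slice wraparound can make an empty
-- segment precede a nonempty one, and A's empty-sentinel skipping of it is an
-- accidental corner behaviour as defensible as B's plain all-equal check.
def Pre_matchPatternForXY (string : String) (pattern : String) (x : Int) (y : Int) : Prop :=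
  (0 ≤ x ∧ 0 ≤ y) ∨ (pattern.toList.count 'x' ≤ 1 ∧ pattern.toList.count 'y' ≤ 1)
instance (string : String) (pattern : String) (x : Int) (y : Int) : Decidable (Pre_matchPatternForXY string pattern x y) := by unfold Pre_matchPatternForXY; infer_instance

def pvWitness_matchPatternForXY : String × String × Int × Int := ("abab", "xyxy", 1, 1)

def Spec_matchPatternForXY (string : String) (pattern : String) (x : Int) (y : Int) (out : Bool × List String) : Prop := out = matchPatternForXY_alt string pattern x y
instance (string : String) (pattern : String) (x : Int) (y : Int) (out : Bool × List String) : Decidable (Spec_matchPatternForXY string pattern x y out) := by unfold Spec_matchPatternForXY; infer_instance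

-- ===== CLAIM (what is proved, stated in full; the proofs are below) =====
def Claim_equal_matchPatternForXY : Prop := ∀ (string : String) (pattern : String) (x : Int) (y : Int), Dom_matchPatternForXY string pattern x y → Pre_matchPatternForXY string pattern x y → Spec_matchPatternForXY string pattern x y (matchPatternForXY string pattern x y)

-- ===== LEMMAS AND PROOFS =====

-- The x- and y-segment lists produced from position `pos` on the remaining pattern.
def pvSegs (string : List Char) (x y : Int) :
    List Char → Int → List (List Char) × List (List Char)
  | [], _ => ([], [])
  | c :: cs, pos =>
    if c = 'x' then
      let r := pvSegs string x y cs (pos + x)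
      (PySem.List.slice string (some pos) (some (pos + x)) :: r.1, r.2)
    else if c = 'y' then
      let r := pvSegs string x y cs (pos + y)
      (r.1, PySem.List.slice string (some pos) (some (pos + y)) :: r.2)
    else pvSegs string x y cs pos

-- What A's sentinel logic computes on a segment list, given the sentinel so far.
def pvChk (v : List Char) (l : List (List Char)) : Option (List Char) :=
  if v = [] then
    match l.dropWhile (· = []) with
    | [] => some []
    | a :: r => if r.all (· = a) then some a else none
  else if l.all (· = v) then some v else none

theorem pvChk_cons_of_ne (v : List Char) (s : List Char) (l : List (List Char)) (hv : v ≠ []) :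
    pvChk v (s :: l) = if s = v then pvChk v l else none := by
  simp only [pvChk, if_neg hv, List.all_cons]
  by_cases h : s = v <;> simp [h]

theorem pvChk_nil_cons (s : List Char) (l : List (List Char)) :
    pvChk [] (s :: l) = pvChk s l := by
  by_cases h : s = []
  · subst h; simp [pvChk]
  · simp [pvChk, h]

-- A's loop from an aligned state (start = end) is the check of the segment lists.
theorem matchPatternForXYGo_eq (string : List Char) (x y : Int) :
    ∀ (cs : List Char) (pos : Int) (xstr ystr : List Char),
      matchPatternForXYGo string x y cs pos pos xstr ystr =
        match pvChk xstr (pvSegs string x y cs pos).1, pvChk ystr (pvSegs string x y cs pos).2 with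
        | some xv, some yv => (true, [String.ofList xv, String.ofList yv])
        | _, _ => (false, ["", ""]) := by
  intro cs
  induction cs with
  | nil =>
    intro pos xstr ystr
    simp [matchPatternForXYGo, pvSegs, pvChk]
    by_cases hx : xstr = [] <;> by_cases hy : ystr = [] <;> simp [hx, hy]
  | cons c cs ih =>
    intro pos xstr ystr
    by_cases hcx : c = 'x'
    · simp only [matchPatternForXYGo, pvSegs, if_pos hcx]
      by_cases hx : xstr = []
      · subst hx
        rw [pvChk_nil_cons]
        simp [ih]
      · rw [pvChk_cons_of_ne _ _ _ hx]
        simp only [if_neg hx, ite_not]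
        by_cases he : PySem.List.slice string (some pos) (some (pos + x)) = xstr
        · rw [if_pos (by rw [he]), if_pos he, ih]
        · rw [if_neg (fun h => he h.symm), if_neg he]
    · by_cases hcy : c = 'y'
      · simp only [matchPatternForXYGo, pvSegs, if_neg hcx, if_pos hcy]
        by_cases hyv : ystr = []
        · subst hyv
          rw [pvChk_nil_cons]
          simp [ih]
        · rw [pvChk_cons_of_ne _ _ _ hyv]
          simp only [if_neg hyv, ite_not]
          by_cases he : PySem.List.slice string (some pos) (some (pos + y)) = ystr
          · rw [if_pos (by rw [he]), if_pos he, ih]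
          · rw [if_neg (fun h => he h.symm), if_neg he]
            cases pvChk xstr (pvSegs string x y cs (pos + y)).1 <;> rfl
      · simp only [matchPatternForXYGo, pvSegs, if_neg hcx, if_neg hcy]
        rw [ih]

-- B's fold appends exactly the pvSegs lists (and some final position).
theorem matchPatternForXY_alt_fold (string : List Char) (x y : Int) :
    ∀ (cs : List Char) (pos : Int) (xs ys : List (List Char)),
      ∃ p : Int,
        cs.foldl
          (fun (acc : Int × List (List Char) × List (List Char)) ch =>
            if ch = 'x' then
              (acc.1 + x, acc.2.1 ++ [PySem.List.slice string (some acc.1) (some (acc.1 + x))], acc.2.2)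
            else if ch = 'y' then
              (acc.1 + y, acc.2.1, acc.2.2 ++ [PySem.List.slice string (some acc.1) (some (acc.1 + y))])
            else acc)
          (pos, xs, ys) =
        (p, xs ++ (pvSegs string x y cs pos).1, ys ++ (pvSegs string x y cs pos).2) := by
  intro cs
  induction cs with
  | nil => intro pos xs ys; exact ⟨pos, by simp [pvSegs]⟩
  | cons c cs ih =>
    intro pos xs ys
    by_cases hcx : c = 'x'
    · obtain ⟨p, hp⟩ := ih (pos + x) (xs ++ [PySem.List.slice string (some pos) (some (pos + x))]) ys
      refine ⟨p, ?_⟩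
      simp only [List.foldl_cons, if_pos hcx, hp, pvSegs]
      simp
    · by_cases hcy : c = 'y'
      · obtain ⟨p, hp⟩ := ih (pos + y) xs (ys ++ [PySem.List.slice string (some pos) (some (pos + y))])
        refine ⟨p, ?_⟩
        simp only [List.foldl_cons, if_neg hcx, if_pos hcy, hp, pvSegs]
        simp
      · obtain ⟨p, hp⟩ := ih pos xs ys
        refine ⟨p, ?_⟩
        simp only [List.foldl_cons, if_neg hcx, if_neg hcy, pvSegs]
        exact hp

-- Slices of nonnegative width: emptiness facts used for the monotonicity argument.
theorem pvSlice_self (s : List Char) (p : Int) :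
    PySem.List.slice s (some p) (some p) = [] := by
  simp [PySem.List.slice]

theorem pvSlice_past_end (s : List Char) (p k : Int) (hp : (s.length : Int) ≤ p) (hk : 0 ≤ k) :
    PySem.List.slice s (some p) (some (p + k)) = [] := by
  simp only [PySem.List.slice, PySem.List.clampIdx]
  have h0 : ¬ p < 0 := by omega
  have h1 : ¬ p + k < 0 := by omega
  rw [if_neg h0, if_neg h1]
  have ha : min p.toNat s.length = s.length := by omega
  have hb : min (p + k).toNat s.length = s.length := by omega
  rw [ha, hb]
  simp

theorem pvSlice_empty_iff (s : List Char) (p k : Int) (hp : 0 ≤ p) (hk : 0 ≤ k) :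
    PySem.List.slice s (some p) (some (p + k)) = [] → k = 0 ∨ (s.length : Int) ≤ p := by
  intro h
  by_contra hcon
  rw [not_or] at hcon
  obtain ⟨hk0', hlen'⟩ := hcon
  have hk0 : k ≠ 0 := hk0'
  have hlen : ¬ (s.length : Int) ≤ p := hlen'
  have h0 : ¬ p < 0 := by omega
  have h1 : ¬ p + k < 0 := by omega
  simp only [PySem.List.slice, PySem.List.clampIdx, if_neg h0, if_neg h1] at h
  rcases List.eq_nil_iff_length_eq_zero.mp h with hlen0
  rw [List.length_take, List.length_drop] at hlen0
  omega

-- If the current position is already past the end (or the width is 0), every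
-- remaining segment of that letter is empty.  Stated for both letters at once.
theorem pvSegs_all_empty (string : List Char) (x y : Int) (hx : 0 ≤ x) (hy : 0 ≤ y) :
    ∀ (cs : List Char) (pos : Int),
      ((x = 0 ∨ (string.length : Int) ≤ pos) → (pvSegs string x y cs pos).1.all (· = []) = true) ∧
      ((y = 0 ∨ (string.length : Int) ≤ pos) → (pvSegs string x y cs pos).2.all (· = []) = true) := by
  intro cs
  induction cs with
  | nil => intro pos; simp [pvSegs]
  | cons c cs ih =>
    intro pos
    by_cases hcx : c = 'x'
    · simp only [pvSegs, if_pos hcx, List.all_cons]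
      constructor
      · rintro (h | h)
        · have h1 : PySem.List.slice string (some pos) (some (pos + x)) = [] := by
            rw [h, add_zero]; exact pvSlice_self string pos
          simp [h1, (ih (pos + x)).1 (Or.inl h)]
        · rw [pvSlice_past_end string pos x h hx]
          simp [(ih (pos + x)).1 (Or.inr (by omega))]
      · rintro (h | h)
        · exact (ih (pos + x)).2 (Or.inl h)
        · exact (ih (pos + x)).2 (Or.inr (by omega))
    · by_cases hcy : c = 'y'
      · simp only [pvSegs, if_neg hcx, if_pos hcy, List.all_cons]
        constructor
        · rintro (h | h)
          · exact (ih (pos + y)).1 (Or.inl h)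
          · exact (ih (pos + y)).1 (Or.inr (by omega))
        · rintro (h | h)
          · have h1 : PySem.List.slice string (some pos) (some (pos + y)) = [] := by
              rw [h, add_zero]; exact pvSlice_self string pos
            simp [h1, (ih (pos + y)).2 (Or.inl h)]
          · rw [pvSlice_past_end string pos y h hy]
            simp [(ih (pos + y)).2 (Or.inr (by omega))]
      · simp only [pvSegs, if_neg hcx, if_neg hcy]
        exact ih pos

-- With nonnegative widths, if the FIRST segment of a letter is empty then ALL its
-- segments are empty (positions only move forward).
theorem pvSegs_head_empty (string : List Char) (x y : Int) (hx : 0 ≤ x) (hy : 0 ≤ y) :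
    ∀ (cs : List Char) (pos : Int), 0 ≤ pos →
      ((pvSegs string x y cs pos).1.headD [] = [] → (pvSegs string x y cs pos).1.all (· = []) = true) ∧
      ((pvSegs string x y cs pos).2.headD [] = [] → (pvSegs string x y cs pos).2.all (· = []) = true) := by
  intro cs
  induction cs with
  | nil => intro pos _; simp [pvSegs]
  | cons c cs ih =>
    intro pos hpos
    by_cases hcx : c = 'x'
    · simp only [pvSegs, if_pos hcx, List.headD_cons, List.all_cons]
      constructor
      · intro h
        rcases pvSlice_empty_iff string pos x hpos hx h with h' | h'
        · simp [h, (pvSegs_all_empty string x y hx hy cs (pos + x)).1 (Or.inl h')]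
        · simp [h, (pvSegs_all_empty string x y hx hy cs (pos + x)).1 (Or.inr (by omega))]
      · exact (ih (pos + x) (by omega)).2
    · by_cases hcy : c = 'y'
      · simp only [pvSegs, if_neg hcx, if_pos hcy, List.headD_cons, List.all_cons]
        constructor
        · exact (ih (pos + y) (by omega)).1
        · intro h
          rcases pvSlice_empty_iff string pos y hpos hy h with h' | h'
          · simp [h, (pvSegs_all_empty string x y hx hy cs (pos + y)).2 (Or.inl h')]
          · simp [h, (pvSegs_all_empty string x y hx hy cs (pos + y)).2 (Or.inr (by omega))]
      · simp only [pvSegs, if_neg hcx, if_neg hcy]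
        exact ih pos hpos

-- On lists whose first-empty forces all-empty, A's sentinel check is B's
-- all-equal-to-the-first check.
theorem pvChk_eq_headD_all (l : List (List Char))
    (h : l.headD [] = [] → l.all (· = []) = true) :
    pvChk [] l = (if l.all (· = l.headD []) then some (l.headD []) else none) := by
  cases l with
  | nil => simp [pvChk]
  | cons a t =>
    by_cases ha : a = []
    · subst ha
      have := h (by simp)
      simp only [List.all_cons] at this
      have ht : t.all (· = ([] : List Char)) = true := by
        simp only [Bool.and_eq_true] at this; exact this.2
      have hdw : (([] : List Char) :: t).dropWhile (· = []) = [] := by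
        rw [List.dropWhile_eq_nil_iff]
        intro x hx
        simp only [List.mem_cons] at hx
        rcases hx with h1 | h1
        · simp [h1]
        · have := List.all_eq_true.mp ht x h1
          simpa using this
      simp [pvChk, hdw, List.all_cons, ht]
    · rw [pvChk_nil_cons]
      simp only [pvChk, if_neg ha, List.headD_cons, List.all_cons]
      simp

-- Each letter contributes exactly as many segments as its occurrences in the pattern.
theorem pvSegs_length (string : List Char) (x y : Int) :
    ∀ (cs : List Char) (pos : Int),
      (pvSegs string x y cs pos).1.length = cs.count 'x' ∧
      (pvSegs string x y cs pos).2.length = cs.count 'y' := by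
  intro cs
  induction cs with
  | nil => intro pos; simp [pvSegs]
  | cons c cs ih =>
    intro pos
    by_cases hcx : c = 'x'
    · simp [pvSegs, hcx, (ih (pos + x)).1, (ih (pos + x)).2]
    · by_cases hcy : c = 'y'
      · simp [pvSegs, hcy, (ih (pos + y)).1, (ih (pos + y)).2]
      · simp [pvSegs, hcx, hcy, (ih pos).1, (ih pos).2]

-- A list with at most one element trivially has the first-empty-forces-all-empty property.
theorem pvShort_head_empty (l : List (List Char)) (h : l.length ≤ 1) :
    l.headD [] = [] → l.all (· = []) = true := by
  match l, h with
  | [], _ => intro _; rfl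
  | [a], _ => intro ha; simp_all

-- Glue: the optional results combine exactly as B's final conditional.
theorem pvGlue (c1 c2 : Bool) (v1 v2 : List Char) :
    (match (if c1 then some v1 else none : Option (List Char)),
           (if c2 then some v2 else none : Option (List Char)) with
     | some a, some b => (true, [String.ofList a, String.ofList b])
     | _, _ => (false, ["", ""])) =
    (if c1 && c2 then (true, [String.ofList v1, String.ofList v2]) else (false, ["", ""])) := by
  cases c1 <;> cases c2 <;> rfl

-- ===== VERDICT (by name: the statement is the Claim_ definition above) =====
theorem matchPatternForXY_spec : Claim_equal_matchPatternForXY := by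
  intro string pattern x y _ hpre
  have hhead :
      ((pvSegs string.toList x y pattern.toList 0).1.headD [] = [] →
        (pvSegs string.toList x y pattern.toList 0).1.all (· = []) = true) ∧
      ((pvSegs string.toList x y pattern.toList 0).2.headD [] = [] →
        (pvSegs string.toList x y pattern.toList 0).2.all (· = []) = true) := by
    rcases hpre with ⟨hx, hy⟩ | ⟨hcx, hcy⟩
    · exact pvSegs_head_empty string.toList x y hx hy pattern.toList 0 (by omega)
    · have hl := pvSegs_length string.toList x y pattern.toList 0
      exact ⟨pvShort_head_empty _ (by omega), pvShort_head_empty _ (by omega)⟩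
  unfold Spec_matchPatternForXY matchPatternForXY matchPatternForXY_alt
  obtain ⟨p, hp⟩ := matchPatternForXY_alt_fold string.toList x y pattern.toList 0 [] []
  rw [matchPatternForXYGo_eq, hp]
  simp only [List.nil_append]
  rw [pvChk_eq_headD_all _ hhead.1, pvChk_eq_headD_all _ hhead.2, pvGlue]
  rfl
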